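-- pv_equiv track=rewrite | github.com/AbdulkadirUgas/ARC | arc_visualizer/tag_arc_tasks.py | color_tile_map_if_exists
-- ===== SOURCE A (Python) =====
-- Grid = list[list[int]]
--
-- def shape(grid: Grid) -> tuple[int, int]:
--     return len(grid), len(grid[0]) if grid else 0
--
-- def color_tile_map_if_exists(base: Grid, out: Grid) -> dict[int, int] | None:
--     bh, bw = shape(base)
--     oh, ow = shape(out)
--     if bh == 0 or bw == 0 or oh % bh != 0 or ow % bw != 0:
--         return None
--     if oh == bh and ow == bw:
--         return None
--     mapping: dict[int, int] = {}
--     for r in range(oh):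
--         for c in range(ow):
--             src = base[r % bh][c % bw]
--             dst = out[r][c]
--             if src in mapping and mapping[src] != dst:
--                 return None
--             mapping[src] = dst
--     return mapping
-- ===== SOURCE B (Python) =====
-- Grid = list[list[int]]
--
-- def shape(grid: Grid) -> tuple[int, int]:
--     return len(grid), len(grid[0]) if grid else 0
--
-- def color_tile_map_if_exists(base: Grid, out: Grid) -> dict[int, int] | None:
--     bh, bw = shape(base)
--     oh, ow = shape(out)
--     if bh == 0 or bw == 0 or oh % bh != 0 or ow % bw != 0:
--         return None
--     if oh == bh and ow == bw:
--         return None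
--     if oh == 0 or ow == 0:
--         return {}  # empty output: nothing to map
--     # phase 1: read the candidate mapping off the base-sized top-left block
--     # (first occurrence wins; conflicts are caught by the verification pass,
--     # which re-checks every cell of that block too)
--     mapping: dict[int, int] = {}
--     for brow, orow in zip(base, out):
--         for src, dst in zip(brow[:bw], orow):
--             mapping.setdefault(src, dst)
--     # phase 2: verify every output cell against the mapped tiling
--     for r in range(oh):
--         for c in range(ow):
--             if out[r][c] != mapping[base[r % bh][c % bw]]:
--                 return None
--     return mapping
-- ===== Notes on version B (the rewrite author's own statement) =====
-- stated objective: alternative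
-- what changed: A interleaves building the color mapping and checking it in one nested index scan over the whole output grid; B first reads the mapping off the base-sized top-left block by zipping base rows with output rows (dict.setdefault, first occurrence wins, no conflict check), then a separate verification pass checks every output cell against the mapped tiling, which also catches conflicts.
-- outside the precondition, e.g. on color_tile_map_if_exists([[1, 2], [1, 2]], [[3, 4, 5, 6], []]): A returns None, B returns None
import Mathlib
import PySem

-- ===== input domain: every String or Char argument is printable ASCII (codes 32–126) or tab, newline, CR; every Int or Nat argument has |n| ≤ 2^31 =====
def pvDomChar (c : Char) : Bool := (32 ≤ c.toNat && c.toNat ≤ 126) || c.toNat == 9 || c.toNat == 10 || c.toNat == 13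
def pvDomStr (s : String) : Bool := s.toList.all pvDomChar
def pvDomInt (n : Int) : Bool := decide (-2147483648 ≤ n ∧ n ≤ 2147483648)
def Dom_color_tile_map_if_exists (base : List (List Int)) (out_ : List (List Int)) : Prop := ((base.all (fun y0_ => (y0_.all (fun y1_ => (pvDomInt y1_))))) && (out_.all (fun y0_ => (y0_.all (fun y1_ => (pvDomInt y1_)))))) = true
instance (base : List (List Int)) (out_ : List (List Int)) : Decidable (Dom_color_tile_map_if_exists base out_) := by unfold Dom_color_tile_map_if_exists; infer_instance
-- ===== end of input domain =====

-- B replaces A's single interleaved build-and-check scan of the whole output grid by a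
-- build-then-verify decomposition (mapping built from the base-sized top-left block, then a
-- separate verification pass); objective: alternative (same asymptotic cost).

-- ===== PORT A =====

-- shape(grid) = (len(grid), len(grid[0]) if grid else 0)
def pvShape (g : List (List Int)) : Nat × Nat :=
  (g.length, if g.length ≠ 0 then (g.headD []).length else 0)

-- g[r][c] for indices that are in range on Pre_ inputs (getD's default is never read there)
def pvCell (g : List (List Int)) (r c : Nat) : Int := (g.getD r []).getD c 0

-- A's loop body:  if src in mapping and mapping[src] != dst: return None; mapping[src] = dst
def pvStep (src dst : Int) (om : Option (PySem.Dict Int Int)) : Option (PySem.Dict Int Int) :=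
  match om with
  | none => none
  | some m =>
    match m.get? src with
    | some v => if v ≠ dst then none else some (m.insert src dst)
    | none => some (m.insert src dst)

def color_tile_map_if_exists (base : List (List Int)) (out_ : List (List Int)) : Option (List (Int × Int)) :=
  let bh := (pvShape base).1
  let bw := (pvShape base).2
  let oh := (pvShape out_).1
  let ow := (pvShape out_).2
  if bh == 0 || bw == 0 || oh % bh != 0 || ow % bw != 0 then none
  else if oh == bh && ow == bw then none
  else
    ((List.range oh).foldl (fun om r =>
        (List.range ow).foldl (fun om c =>
          pvStep (pvCell base (r % bh) (c % bw)) (pvCell out_ r c) om) om)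
      (some PySem.Dict.empty)).map (fun m => m.items)

-- ===== PORT B =====
def color_tile_map_if_exists_alt (base : List (List Int)) (out_ : List (List Int)) : Option (List (Int × Int)) :=
  let bh := (pvShape base).1
  let bw := (pvShape base).2
  let oh := (pvShape out_).1
  let ow := (pvShape out_).2
  if bh == 0 || bw == 0 || oh % bh != 0 || ow % bw != 0 then none
  else if oh == bh && ow == bw then none
  else if oh == 0 || ow == 0 then some []
  else
    -- phase 1: read the candidate mapping off the base-sized top-left block (first occurrence wins)
    let m := (base.zip out_).foldl (fun m p =>
        ((p.1.take bw).zip p.2).foldl (fun m q => m.setdefault q.1 q.2) m)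
      PySem.Dict.empty
    -- phase 2: verify every output cell against the mapped tiling
    if (List.range oh).all (fun r => (List.range ow).all (fun c =>
         pvCell out_ r c == m.getD (pvCell base (r % bh) (c % bw)) 0))
    then some m.items else none

-- ===== PRECONDITION & SPEC =====
-- Pre_ excludes ragged grids (a row shorter than row 0) except where the divisibility/identity
-- guard or an empty output already decides the result: on such ragged inputs the scans index
-- out of range and Python generally raises IndexError; on some of them both A and B stop with
-- None before reaching a short row.
def Pre_color_tile_map_if_exists (base : List (List Int)) (out_ : List (List Int)) : Prop :=
  (base.length = 0 ∨ (base.headD []).length = 0 ∨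
    ¬ out_.length % base.length = 0 ∨ ¬ (out_.headD []).length % (base.headD []).length = 0) ∨
  (out_.length = base.length ∧ (out_.headD []).length = (base.headD []).length) ∨
  (out_.length = 0 ∨ (out_.headD []).length = 0) ∨
  ((∀ row ∈ base, (base.headD []).length ≤ row.length) ∧
   (∀ row ∈ out_, (out_.headD []).length ≤ row.length))
instance (base : List (List Int)) (out_ : List (List Int)) : Decidable (Pre_color_tile_map_if_exists base out_) := by unfold Pre_color_tile_map_if_exists; infer_instance

def pvWitness_color_tile_map_if_exists : List (List Int) × List (List Int) := ([[1]], [[1, 1]])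

def Spec_color_tile_map_if_exists (base : List (List Int)) (out_ : List (List Int)) (out : Option (List (Int × Int))) : Prop := out = color_tile_map_if_exists_alt base out_
instance (base : List (List Int)) (out_ : List (List Int)) (out : Option (List (Int × Int))) : Decidable (Spec_color_tile_map_if_exists base out_ out) := by unfold Spec_color_tile_map_if_exists; infer_instance

-- ===== CLAIM (what is proved, stated in full; the proofs are below) =====
def Claim_equal_color_tile_map_if_exists : Prop := ∀ (base : List (List Int)) (out_ : List (List Int)), Dom_color_tile_map_if_exists base out_ → Pre_color_tile_map_if_exists base out_ → Spec_color_tile_map_if_exists base out_ (color_tile_map_if_exists base out_)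

-- ===== LEMMAS AND PROOFS =====

-- the interleaved build-with-conflict-check, as a fold over a flat (src, dst) pair list
def pvBuild (ps : List (Int × Int)) (om : Option (PySem.Dict Int Int)) : Option (PySem.Dict Int Int) :=
  ps.foldl (fun om p => pvStep p.1 p.2 om) om

def pvKF (m : PySem.Dict Int Int) (ps : List (Int × Int)) : PySem.Dict Int Int :=
  ps.foldl (fun m p => if (m.get? p.1).isSome then m else m.insert p.1 p.2) m

def pvCoh (ps : List (Int × Int)) : Prop := ∀ p ∈ ps, ∀ q ∈ ps, p.1 = q.1 → p.2 = q.2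

def pvPairsT (base out_ : List (List Int)) (bh bw oh ow : Nat) : List (Int × Int) :=
  (List.range oh).flatMap (fun r => (List.range ow).map (fun c =>
    (pvCell base (r % bh) (c % bw), pvCell out_ r c)))

def pvPairsS (base out_ : List (List Int)) (bh bw : Nat) : List (Int × Int) :=
  (List.range bh).flatMap (fun i => (List.range bw).map (fun j =>
    (pvCell base i j, pvCell out_ i j)))

def pvChunk (base out_ : List (List Int)) (bh bw r : Nat) : List (Int × Int) :=
  (List.range bw).map (fun c => (pvCell base (r % bh) (c % bw), pvCell out_ r c))

lemma pv_insert_eq_self (m : PySem.Dict Int Int) (k v : Int)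
    (h : m.get? k = some v) (hn : m.keys.Nodup) : m.insert k v = m := by
  have hc : m.contains k = true := by rw [PySem.Dict.contains_eq_isSome_get?, h]; rfl
  apply PySem.Dict.ext
  rw [PySem.Dict.items_insert_of_contains (h := hc)]
  conv_rhs => rw [← List.map_id m.items]
  apply List.map_congr_left
  intro p hp
  by_cases hk : p.1 = k
  · have := PySem.Dict.get?_of_mem_items (d := m) (k := p.1) (v := p.2) (by simpa using hp) hn
    rw [hk, h] at this
    obtain ⟨p1, p2⟩ := p
    simp only at hk
    subst hk
    rw [Option.some_inj.mp this]
    simp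
  · simp [hk]

lemma pv_build_none (ps : List (Int × Int)) : pvBuild ps none = none := by
  induction ps with
  | nil => rfl
  | cons p ps ih => simpa [pvBuild, pvStep] using ih

lemma pv_build_eq_KF (ps : List (Int × Int)) : ∀ m : PySem.Dict Int Int, m.keys.Nodup →
    (∀ p ∈ ps, ∀ v, m.get? p.1 = some v → p.2 = v) → pvCoh ps →
    pvBuild ps (some m) = some (pvKF m ps) := by
  induction ps with
  | nil => intro m _ _ _; rfl
  | cons p ps ih =>
    intro m hn hagree hcoh
    have hstep : pvBuild (p :: ps) (some m) = pvBuild ps (pvStep p.1 p.2 (some m)) := rfl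
    cases h : m.get? p.1 with
    | some v =>
      have hv : p.2 = v := hagree p (by simp) v h
      have : pvStep p.1 p.2 (some m) = some m := by
        simp only [pvStep, h]
        rw [if_neg (by simp [hv]), hv, pv_insert_eq_self m p.1 v h hn]
      rw [hstep, this, pvKF, List.foldl_cons]
      have hS : (m.get? p.1).isSome := by rw [h]; rfl
      rw [if_pos hS]
      exact ih m hn (fun q hq v hv => hagree q (by simp [hq]) v hv)
        (fun a ha b hb => hcoh a (by simp [ha]) b (by simp [hb]))
    | none =>
      have : pvStep p.1 p.2 (some m) = some (m.insert p.1 p.2) := by simp [pvStep, h]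
      rw [hstep, this, pvKF, List.foldl_cons]
      have hS : ¬ (m.get? p.1).isSome := by rw [h]; simp
      rw [if_neg hS]
      refine ih _ (PySem.Dict.nodup_keys_insert _ _ _ hn) ?_
        (fun a ha b hb => hcoh a (by simp [ha]) b (by simp [hb]))
      intro q hq v hv
      rw [PySem.Dict.get?_insert] at hv
      split_ifs at hv with hk
      · rw [hcoh q (by simp [hq]) p (by simp) hk]; exact Option.some_inj.mp hv
      · exact hagree q (by simp [hq]) v hv

lemma pv_build_coh (ps : List (Int × Int)) : ∀ (m m' : PySem.Dict Int Int), m.keys.Nodup →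
    pvBuild ps (some m) = some m' →
    (∀ p ∈ ps, ∀ v, m.get? p.1 = some v → p.2 = v) ∧ pvCoh ps := by
  induction ps with
  | nil => intro m m' _ _; exact ⟨by simp, by intro p hp; simp at hp⟩
  | cons p ps ih =>
    intro m m' hn hb
    have hstep : pvBuild (p :: ps) (some m) = pvBuild ps (pvStep p.1 p.2 (some m)) := rfl
    rw [hstep] at hb
    cases h : m.get? p.1 with
    | some v =>
      have hv : p.2 = v := by
        by_contra hne
        rw [show pvStep p.1 p.2 (some m) = none by simp [pvStep, h, Ne.symm, hne],
          pv_build_none] at hb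
        simp at hb
      rw [show pvStep p.1 p.2 (some m) = some m by
          simp only [pvStep, h]
          rw [if_neg (by simp [hv]), hv, pv_insert_eq_self m p.1 v h hn]] at hb
      obtain ⟨hagree, hcoh⟩ := ih m m' hn hb
      constructor
      · intro q hq w hw
        rcases List.mem_cons.mp hq with rfl | hq'
        · rw [h] at hw; rw [hv]; exact Option.some_inj.mp hw
        · exact hagree q hq' w hw
      · intro a ha b hb' hk
        rcases List.mem_cons.mp ha with rfl | ha' <;> rcases List.mem_cons.mp hb' with rfl | hb''
        · rfl
        · rw [hv]; exact (hagree b hb'' v (by rw [← hk, h])).symm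
        · rw [hagree a ha' v (by rw [hk, h]), hv]
        · exact hcoh a ha' b hb'' hk
    | none =>
      rw [show pvStep p.1 p.2 (some m) = some (m.insert p.1 p.2) by simp [pvStep, h]] at hb
      obtain ⟨hagree, hcoh⟩ := ih _ m' (PySem.Dict.nodup_keys_insert _ _ _ hn) hb
      have hins : ∀ q ∈ ps, q.1 = p.1 → q.2 = p.2 := by
        intro q hq hk
        exact hagree q hq p.2 (by rw [PySem.Dict.get?_insert, if_pos hk])
      constructor
      · intro q hq w hw
        rcases List.mem_cons.mp hq with rfl | hq'
        · rw [h] at hw; simp at hw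
        · by_cases hk : q.1 = p.1
          · rw [hk, h] at hw; simp at hw
          · exact hagree q hq' w (by rw [PySem.Dict.get?_insert, if_neg hk, hw])
      · intro a ha b hb' hk
        rcases List.mem_cons.mp ha with rfl | ha' <;> rcases List.mem_cons.mp hb' with rfl | hb''
        · rfl
        · exact (hins b hb'' hk.symm).symm
        · exact hins a ha' hk
        · exact hcoh a ha' b hb'' hk

lemma pv_KF_get? (ps : List (Int × Int)) : ∀ (m : PySem.Dict Int Int) (k : Int),
    (pvKF m ps).get? k = (m.get? k).or ((ps.find? (fun p => p.1 == k)).map Prod.snd) := by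
  induction ps with
  | nil => intro m k; simp [pvKF]
  | cons p ps ih =>
    intro m k
    rw [pvKF, List.foldl_cons]
    by_cases hs : (m.get? p.1).isSome
    · rw [if_pos hs]
      rw [show List.foldl _ m ps = pvKF m ps from rfl, ih]
      by_cases hk : p.1 = k
      · subst hk
        obtain ⟨v, hv⟩ := Option.isSome_iff_exists.mp hs
        simp [hv]
      · simp [hk]
    · rw [if_neg hs]
      rw [show List.foldl _ (m.insert p.1 p.2) ps = pvKF (m.insert p.1 p.2) ps from rfl, ih]
      rw [PySem.Dict.get?_insert]
      by_cases hk : k = p.1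
      · subst hk
        rw [if_pos rfl]
        rw [Option.not_isSome_iff_eq_none] at hs
        simp [hs]
      · rw [if_neg hk]
        rw [List.find?_cons_of_neg (h := by simpa using Ne.symm hk)]

lemma pv_KF_covers (ps : List (Int × Int)) (m : PySem.Dict Int Int) (k : Int)
    (hp : ∃ p ∈ ps, p.1 = k) : ((pvKF m ps).get? k).isSome := by
  rw [pv_KF_get?]
  rcases hp with ⟨p, hp, hk⟩
  have : (ps.find? (fun p => p.1 == k)).isSome := by
    rw [List.find?_isSome]; exact ⟨p, hp, by simp [hk]⟩
  obtain ⟨q, hq⟩ := Option.isSome_iff_exists.mp this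
  rw [hq]
  cases m.get? k <;> simp

lemma pv_KF_absorb (ps : List (Int × Int)) : ∀ m : PySem.Dict Int Int,
    (∀ p ∈ ps, (m.get? p.1).isSome) → pvKF m ps = m := by
  induction ps with
  | nil => intro m _; rfl
  | cons p ps ih =>
    intro m h
    rw [pvKF, List.foldl_cons, if_pos (h p (by simp))]
    exact ih m (fun q hq => h q (by simp [hq]))

lemma pv_KF_append (m : PySem.Dict Int Int) (xs ys : List (Int × Int)) :
    pvKF m (xs ++ ys) = pvKF (pvKF m xs) ys := by
  rw [pvKF, pvKF, pvKF, List.foldl_append]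

lemma pv_KF_flatMap (l : List Nat) (f : Nat → List (Int × Int)) (m : PySem.Dict Int Int) :
    pvKF m (l.flatMap f) = l.foldl (fun m x => pvKF m (f x)) m := by
  rw [pvKF, List.foldl_flatMap]; rfl

-- one output row collapses (under pvKF) to its leading base-width chunk
lemma pv_row_chunk (base out_ : List (List Int)) (bh bw ow : Nat)
    (hbw : 0 < bw) (hdw : bw ∣ ow) (how : 0 < ow) :
    ∀ (m : PySem.Dict Int Int) (r : Nat),
      pvKF m ((List.range ow).map (fun c => (pvCell base (r % bh) (c % bw), pvCell out_ r c)))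
        = pvKF m (pvChunk base out_ bh bw r) := by
  intro m r
  have hle : bw ≤ ow := Nat.le_of_dvd how hdw
  have hsplit : ow = bw + (ow - bw) := by omega
  rw [hsplit, List.range_add, List.map_append, pv_KF_append, List.map_map]
  apply pv_KF_absorb
  intro p hp
  simp only [List.mem_map, List.mem_range, Function.comp] at hp
  obtain ⟨c', hc', rfl⟩ := hp
  have hmod : (bw + c') % bw = c' % bw := Nat.add_mod_left bw c'
  apply pv_KF_covers
  refine ⟨(pvCell base (r % bh) ((c' % bw) % bw), pvCell out_ r (c' % bw)), ?_, ?_⟩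
  · simp only [List.mem_map, List.mem_range]
    exact ⟨c' % bw, Nat.mod_lt _ hbw, rfl⟩
  · simp only [hmod, Nat.mod_eq_of_lt (Nat.mod_lt c' hbw)]

-- for r < bh the chunk is exactly the base-block row
lemma pv_chunk_eq_srow (base out_ : List (List Int)) (bh bw r : Nat) (hr : r < bh) :
    pvChunk base out_ bh bw r
      = (List.range bw).map (fun j => (pvCell base r j, pvCell out_ r j)) := by
  apply List.map_congr_left
  intro j hj
  simp only [List.mem_range] at hj
  rw [Nat.mod_eq_of_lt hr, Nat.mod_eq_of_lt hj]

lemma pv_KF_T_eq_S (base out_ : List (List Int)) (bh bw oh ow : Nat)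
    (hbh : 0 < bh) (hbw : 0 < bw) (hdh : bh ∣ oh) (hdw : bw ∣ ow)
    (hoh : 0 < oh) (how : 0 < ow) :
    pvKF PySem.Dict.empty (pvPairsT base out_ bh bw oh ow)
      = pvKF PySem.Dict.empty (pvPairsS base out_ bh bw) := by
  have hbhle : bh ≤ oh := Nat.le_of_dvd hoh hdh
  rw [pvPairsT, pv_KF_flatMap]
  have hrow : ∀ (m : PySem.Dict Int Int) (r : Nat),
      pvKF m ((List.range ow).map (fun c => (pvCell base (r % bh) (c % bw), pvCell out_ r c)))
        = pvKF m (pvChunk base out_ bh bw r) := pv_row_chunk base out_ bh bw ow hbw hdw how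
  simp only [hrow]
  have hsplit : oh = bh + (oh - bh) := by omega
  rw [hsplit, List.range_add, List.foldl_append]
  have hfirst : (List.range bh).foldl (fun m r => pvKF m (pvChunk base out_ bh bw r))
      PySem.Dict.empty = pvKF PySem.Dict.empty (pvPairsS base out_ bh bw) := by
    rw [pvPairsS, pv_KF_flatMap]
    apply PySem.List.foldl_congr_mem
    intro m r hr
    rw [pv_chunk_eq_srow base out_ bh bw r (List.mem_range.mp hr)]
  rw [hfirst]
  -- remaining rows are fully absorbed
  have habs : ∀ r, pvKF (pvKF PySem.Dict.empty (pvPairsS base out_ bh bw))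
      (pvChunk base out_ bh bw r) = pvKF PySem.Dict.empty (pvPairsS base out_ bh bw) := by
    intro r
    apply pv_KF_absorb
    intro p hp
    simp only [pvChunk, List.mem_map, List.mem_range] at hp
    obtain ⟨c, hc, rfl⟩ := hp
    apply pv_KF_covers
    refine ⟨(pvCell base (r % bh) (c % bw), pvCell out_ (r % bh) (c % bw)), ?_, rfl⟩
    simp only [pvPairsS, List.mem_flatMap, List.mem_map, List.mem_range]
    exact ⟨r % bh, Nat.mod_lt _ hbh, c % bw, Nat.mod_lt _ hbw, rfl⟩
  induction (oh - bh) with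
  | zero => simp
  | succ n ihn =>
    rw [List.range_succ, List.map_append, List.foldl_append, ihn]
    simpa using habs (bh + n)

lemma pv_S_sub_T (base out_ : List (List Int)) (bh bw oh ow : Nat)
    (hbhle : bh ≤ oh) (hbwle : bw ≤ ow) :
    ∀ p ∈ pvPairsS base out_ bh bw, p ∈ pvPairsT base out_ bh bw oh ow := by
  intro p hp
  simp only [pvPairsS, List.mem_flatMap, List.mem_map, List.mem_range] at hp
  obtain ⟨i, hi, j, hj, rfl⟩ := hp
  simp only [pvPairsT, List.mem_flatMap, List.mem_map, List.mem_range]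
  exact ⟨i, by omega, j, by omega, by rw [Nat.mod_eq_of_lt hi, Nat.mod_eq_of_lt hj]⟩

lemma pv_coh_of_verify (base out_ : List (List Int)) (bh bw oh ow : Nat)
    (m : PySem.Dict Int Int)
    (hall : (List.range oh).all (fun r => (List.range ow).all (fun c =>
        pvCell out_ r c == m.getD (pvCell base (r % bh) (c % bw)) 0)) = true) :
    pvCoh (pvPairsT base out_ bh bw oh ow) := by
  simp only [List.all_eq_true, List.mem_range, beq_iff_eq] at hall
  intro p hp q hq hk
  simp only [pvPairsT, List.mem_flatMap, List.mem_map, List.mem_range] at hp hq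
  obtain ⟨r, hr, c, hc, rfl⟩ := hp
  obtain ⟨r', hr', c', hc', rfl⟩ := hq
  simp only
  rw [hall r hr c hc, hall r' hr' c' hc']
  simp only at hk
  rw [hk]

lemma pv_verify_of_coh (base out_ : List (List Int)) (bh bw oh ow : Nat)
    (hbh : 0 < bh) (hbw : 0 < bw) (hbhle : bh ≤ oh) (hbwle : bw ≤ ow)
    (hcT : pvCoh (pvPairsT base out_ bh bw oh ow)) :
    (List.range oh).all (fun r => (List.range ow).all (fun c =>
        pvCell out_ r c ==
          (pvKF PySem.Dict.empty (pvPairsS base out_ bh bw)).getD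
            (pvCell base (r % bh) (c % bw)) 0)) = true := by
  simp only [List.all_eq_true, List.mem_range, beq_iff_eq]
  intro r hr c hc
  set k := pvCell base (r % bh) (c % bw) with hkdef
  have hfind : ((pvPairsS base out_ bh bw).find? (fun p => p.1 == k)).isSome := by
    rw [List.find?_isSome]
    refine ⟨(pvCell base (r % bh) (c % bw), pvCell out_ (r % bh) (c % bw)), ?_, by simp [hkdef]⟩
    simp only [pvPairsS, List.mem_flatMap, List.mem_map, List.mem_range]
    exact ⟨r % bh, Nat.mod_lt _ hbh, c % bw, Nat.mod_lt _ hbw, rfl⟩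
  obtain ⟨q, hq⟩ := Option.isSome_iff_exists.mp hfind
  have hqmem : q ∈ pvPairsS base out_ bh bw := List.mem_of_find?_eq_some hq
  have hqk : q.1 = k := by simpa using List.find?_some hq
  have hget : (pvKF PySem.Dict.empty (pvPairsS base out_ bh bw)).get? k = some q.2 := by
    rw [pv_KF_get?, hq]
    simp [PySem.Dict.get?_empty]
  rw [PySem.Dict.getD_eq_get?_getD, hget]
  have hqT : q ∈ pvPairsT base out_ bh bw oh ow :=
    pv_S_sub_T base out_ bh bw oh ow hbhle hbwle q hqmem
  have hpT : (k, pvCell out_ r c) ∈ pvPairsT base out_ bh bw oh ow := by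
    simp only [pvPairsT, List.mem_flatMap, List.mem_map, List.mem_range]
    exact ⟨r, hr, c, hc, rfl⟩
  exact (hcT q hqT (k, pvCell out_ r c) hpT hqk).symm

lemma pv_foldT (base out_ : List (List Int)) (bh bw oh ow : Nat)
    (om : Option (PySem.Dict Int Int)) :
    (List.range oh).foldl (fun om r =>
        (List.range ow).foldl (fun om c =>
          pvStep (pvCell base (r % bh) (c % bw)) (pvCell out_ r c) om) om) om
      = pvBuild (pvPairsT base out_ bh bw oh ow) om := by
  rw [pvBuild, pvPairsT, List.foldl_flatMap]
  simp only [List.foldl_map]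

lemma pv_setdefault_eq (d : PySem.Dict Int Int) (k v : Int) :
    d.setdefault k v = if (d.get? k).isSome then d else d.insert k v := by
  by_cases h : d.contains k = true
  · rw [PySem.Dict.setdefault_of_contains (h := h), if_pos]
    rw [← PySem.Dict.contains_eq_isSome_get?, h]
  · rw [PySem.Dict.setdefault_of_not_contains (h := by simpa using h), if_neg]
    rw [← PySem.Dict.contains_eq_isSome_get?]
    simpa using h

-- the zipped top-left block of B's phase 1 is exactly the base-block pair list
lemma pv_block_pairs (base out_ : List (List Int)) (bw ow : Nat)
    (hlen : base.length ≤ out_.length)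
    (hbase : ∀ row ∈ base, bw ≤ row.length)
    (hout : ∀ row ∈ out_, ow ≤ row.length) (hbwow : bw ≤ ow) :
    (base.zip out_).flatMap (fun p => (p.1.take bw).zip p.2)
      = pvPairsS base out_ base.length bw := by
  have hzip : base.zip out_
      = (List.range base.length).map (fun i => (base.getD i [], out_.getD i [])) := by
    apply List.ext_getElem
    · simp [Nat.min_eq_left hlen]
    · intro i h1 h2
      simp only [List.getElem_zip, List.getElem_map, List.getElem_range]
      have hib : i < base.length := by simpa [Nat.min_eq_left hlen] using h1
      have hio : i < out_.length := by omega
      rw [List.getD_eq_getElem _ _ hib, List.getD_eq_getElem _ _ hio]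
  rw [hzip, List.flatMap_map, pvPairsS]
  apply List.flatMap_congr
  intro i hi
  have hib : i < base.length := List.mem_range.mp hi
  have hio : i < out_.length := by omega
  have hbl : bw ≤ (base.getD i []).length := by
    rw [List.getD_eq_getElem _ _ hib]
    exact hbase _ (List.getElem_mem hib)
  have hol : bw ≤ (out_.getD i []).length := by
    rw [List.getD_eq_getElem _ _ hio]
    exact le_trans hbwow (hout _ (List.getElem_mem hio))
  apply List.ext_getElem
  · simp only [List.length_zip, List.length_take, List.length_map, List.length_range]
    omega
  · intro j h1 h2
    have hj : j < bw := by
      simp only [List.length_zip, List.length_take] at h1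
      omega
    simp only [List.getElem_zip, List.getElem_map, List.getElem_range, List.getElem_take]
    simp only [pvCell]
    have e1 : (base.getD i []).getD j 0 = (base.getD i [])[j]'(by omega) :=
      List.getD_eq_getElem _ _ (by omega)
    have e2 : (out_.getD i []).getD j 0 = (out_.getD i [])[j]'(by omega) :=
      List.getD_eq_getElem _ _ (by omega)
    rw [e1, e2]

lemma pv_phase1 (base out_ : List (List Int)) (bw ow : Nat)
    (hlen : base.length ≤ out_.length)
    (hbase : ∀ row ∈ base, bw ≤ row.length)
    (hout : ∀ row ∈ out_, ow ≤ row.length) (hbwow : bw ≤ ow) :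
    (base.zip out_).foldl (fun m p =>
        ((p.1.take bw).zip p.2).foldl (fun m q => m.setdefault q.1 q.2) m)
      PySem.Dict.empty
      = pvKF PySem.Dict.empty (pvPairsS base out_ base.length bw) := by
  rw [← pv_block_pairs base out_ bw ow hlen hbase hout hbwow, pvKF, List.foldl_flatMap]
  simp only [pv_setdefault_eq]

theorem main_eq (base out_ : List (List Int))
    (hpre : Pre_color_tile_map_if_exists base out_) :
    color_tile_map_if_exists base out_ = color_tile_map_if_exists_alt base out_ := by
  unfold color_tile_map_if_exists color_tile_map_if_exists_alt
  set bh := (pvShape base).1 with hbhdef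
  set bw := (pvShape base).2 with hbwdef
  set oh := (pvShape out_).1 with hohdef
  set ow := (pvShape out_).2 with howdef
  by_cases hg : (bh == 0 || bw == 0 || oh % bh != 0 || ow % bw != 0) = true
  · rw [if_pos hg, if_pos hg]
  · rw [if_neg hg, if_neg hg]
    have hbh : 0 < bh := by
      rcases Nat.eq_zero_or_pos bh with h | h
      · exact absurd (by simp [h]) hg
      · exact h
    have hbw : 0 < bw := by
      rcases Nat.eq_zero_or_pos bw with h | h
      · exact absurd (by simp [h]) hg
      · exact h
    have hdh : oh % bh = 0 := by
      by_contra h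
      exact hg (by simp [h])
    have hdw : ow % bw = 0 := by
      by_contra h
      exact hg (by simp [h])
    by_cases hid : (oh == bh && ow == bw) = true
    · rw [if_pos hid, if_pos hid]
    · rw [if_neg hid, if_neg hid]
      by_cases he : (oh == 0 || ow == 0) = true
      · -- empty output: the interleaved scan runs zero steps
        rw [if_pos he]
        rcases Bool.or_eq_true_iff.mp he with h0 | h0
        · have h0' : oh = 0 := by simpa using h0
          simp only [h0', List.range_zero, List.foldl_nil, Option.map_some]
          rfl
        · have h0' : ow = 0 := by simpa using h0
          simp only [h0', List.range_zero, List.foldl_nil, List.foldl_fixed, Option.map_some]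
          rfl
      · rw [if_neg he]
        simp only [Bool.or_eq_true, beq_iff_eq, not_or] at he
        have hoh : 0 < oh := Nat.pos_of_ne_zero he.1
        have how : 0 < ow := Nat.pos_of_ne_zero he.2
        have hdh' : bh ∣ oh := Nat.dvd_of_mod_eq_zero hdh
        have hdw' : bw ∣ ow := Nat.dvd_of_mod_eq_zero hdw
        have hbhle : bh ≤ oh := Nat.le_of_dvd hoh hdh'
        have hbwle : bw ≤ ow := Nat.le_of_dvd how hdw'
        have h1 : bh = base.length := rfl
        have h2 : oh = out_.length := rfl
        have hbw_eq : bw = (base.headD []).length := by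
          rw [hbwdef]
          show (if base.length ≠ 0 then (base.headD []).length else 0) = _
          rw [if_pos (by omega)]
        have how_eq : ow = (out_.headD []).length := by
          rw [howdef]
          show (if out_.length ≠ 0 then (out_.headD []).length else 0) = _
          rw [if_pos (by omega)]
        -- the guard, identity and empty branches being closed, Pre_ reduces to the row-length bounds
        have hrows : (∀ row ∈ base, bw ≤ row.length) ∧ (∀ row ∈ out_, ow ≤ row.length) := by
          rcases hpre with (h0 | h0 | h0 | h0) | hidp | (h0 | h0) | ⟨ha, hb⟩
          · omega
          · rw [← hbw_eq] at h0; omega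
          · exact absurd hdh h0
          · rw [← hbw_eq, ← how_eq] at h0; exact absurd hdw h0
          · exfalso
            apply hid
            simp only [Bool.and_eq_true, beq_iff_eq]
            refine ⟨by omega, ?_⟩
            rw [hbw_eq, how_eq]
            exact hidp.2
          · omega
          · rw [← how_eq] at h0; omega
          · exact ⟨fun row hr => by rw [hbw_eq]; exact ha row hr,
              fun row hr => by rw [how_eq]; exact hb row hr⟩
        rw [pv_foldT base out_ bh bw oh ow]
        simp only [pv_phase1 base out_ bw ow hbhle hrows.1 hrows.2 hbwle]
        rw [show pvPairsS base out_ base.length bw = pvPairsS base out_ bh bw from rfl]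
        have hndup : (PySem.Dict.empty (κ := Int) (ν := Int)).keys.Nodup :=
          PySem.Dict.nodup_keys_empty
        by_cases hcT : pvCoh (pvPairsT base out_ bh bw oh ow)
        · rw [pv_build_eq_KF _ _ hndup (by simp [PySem.Dict.get?_empty]) hcT]
          simp only [Option.map_some]
          rw [if_pos (pv_verify_of_coh base out_ bh bw oh ow hbh hbw hbhle hbwle hcT)]
          rw [pv_KF_T_eq_S base out_ bh bw oh ow hbh hbw hdh' hdw' hoh how]
        · have hTnone : pvBuild (pvPairsT base out_ bh bw oh ow) (some PySem.Dict.empty) = none := by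
            cases h : pvBuild (pvPairsT base out_ bh bw oh ow) (some PySem.Dict.empty) with
            | none => rfl
            | some m' => exact absurd (pv_build_coh _ _ m' hndup h).2 hcT
          rw [hTnone]
          have hver : ¬ ((List.range oh).all (fun r => (List.range ow).all (fun c =>
              pvCell out_ r c ==
                (pvKF PySem.Dict.empty (pvPairsS base out_ bh bw)).getD
                  (pvCell base (r % bh) (c % bw)) 0)) = true) := by
            intro hall
            exact hcT (pv_coh_of_verify base out_ bh bw oh ow _ hall)
          simp only [Option.map_none]
          rw [if_neg hver]

-- ===== VERDICT (by name: the statement is the Claim_ definition above) =====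
theorem color_tile_map_if_exists_spec : Claim_equal_color_tile_map_if_exists := by
  intro base out_ _ hpre
  exact main_eq base out_ hpre
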